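-- pv_equiv track=rewrite | github.com/TronoSfera/Law | app/api/admin/crud.py | _humanize_identifier_ru
-- ===== SOURCE A (Python) =====
-- def _normalize_table_name(table_name: str) -> str:
--     raw = (table_name or "").strip().replace("-", "_")
--     if not raw:
--         return ""
--     chars: list[str] = []
--     for index, ch in enumerate(raw):
--         if ch.isupper() and index > 0 and raw[index - 1].isalnum() and raw[index - 1] != "_":
--             chars.append("_")
--         chars.append(ch.lower())
--     return "".join(chars)
--
-- def _humanize_identifier_ru(identifier: str) -> str:
--     normalized = _normalize_table_name(identifier)
--     if not normalized:
--         return "Таблица"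
--
--     token_labels = {
--         "request": "заявка",
--         "requests": "заявки",
--         "invoice": "счет",
--         "invoices": "счета",
--         "topic": "тема",
--         "topics": "темы",
--         "status": "статус",
--         "statuses": "статусы",
--         "transition": "переход",
--         "transitions": "переходы",
--         "required": "обязательные",
--         "form": "формы",
--         "field": "поле",
--         "fields": "поля",
--         "template": "шаблон",
--         "templates": "шаблоны",
--         "data": "данных",
--         "requirement": "требование",
--         "requirements": "требования",
--         "admin": "админ",
--         "user": "пользователь",
--         "users": "пользователи",
--         "quote": "цитата",
--         "quotes": "цитаты",
--         "message": "сообщение",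
--         "messages": "сообщения",
--         "attachment": "вложение",
--         "attachments": "вложения",
--         "notification": "уведомление",
--         "notifications": "уведомления",
--         "audit": "аудита",
--         "security": "безопасности",
--         "log": "журнал",
--         "history": "история",
--         "otp": "OTP",
--         "session": "сессия",
--         "sessions": "сессии",
--         "id": "ID",
--     }
--     words = [token_labels.get(token, token) for token in normalized.split("_") if token]
--     if not words:
--         return "Таблица"
--     phrase = " ".join(words).strip()
--     return phrase[:1].upper() + phrase[1:] if phrase else "Таблица"
-- ===== SOURCE B (Python) =====
-- # Single-pass re-implementation: tokenize the stripped raw string directly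
-- # (flush on '_' or on an uppercase letter after an alphanumeric char),
-- # skipping A's intermediate normalized string and its separate split step.
-- TOKEN_LABELS = {
--     "request": "заявка", "requests": "заявки", "invoice": "счет", "invoices": "счета",
--     "topic": "тема", "topics": "темы", "status": "статус", "statuses": "статусы",
--     "transition": "переход", "transitions": "переходы", "required": "обязательные",
--     "form": "формы", "field": "поле", "fields": "поля", "template": "шаблон",
--     "templates": "шаблоны", "data": "данных", "requirement": "требование",
--     "requirements": "требования", "admin": "админ", "user": "пользователь",
--     "users": "пользователи", "quote": "цитата", "quotes": "цитаты",
--     "message": "сообщение", "messages": "сообщения", "attachment": "вложение",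
--     "attachments": "вложения", "notification": "уведомление",
--     "notifications": "уведомления", "audit": "аудита", "security": "безопасности",
--     "log": "журнал", "history": "история", "otp": "OTP", "session": "сессия",
--     "sessions": "сессии", "id": "ID",
-- }
--
-- def _humanize_identifier_ru(identifier: str) -> str:
--     raw = identifier.strip().replace("-", "_")
--     tokens = []
--     cur = []
--     prev = ""
--     for ch in raw:
--         if ch == "_":
--             if cur:
--                 tokens.append("".join(cur))
--             cur = []
--         elif ch.isupper() and prev.isalnum():
--             if cur:
--                 tokens.append("".join(cur))
--             cur = [ch.lower()]
--         else:
--             cur.append(ch.lower())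
--         prev = ch
--     if cur:
--         tokens.append("".join(cur))
--     if not tokens:
--         return "Таблица"
--     phrase = " ".join(TOKEN_LABELS.get(t, t) for t in tokens).strip()
--     return phrase[:1].upper() + phrase[1:] if phrase else "Таблица"
-- ===== Notes on version B (the rewrite author's own statement) =====
-- stated objective: alternative
-- what changed: B replaces A's two-phase pipeline (build an intermediate normalized string char-by-char, then split it on underscores and drop empty pieces) with a single fused pass over the stripped raw string that maintains a current-token buffer and a token list, flushing on an underscore separator or on an uppercase letter following an alphanumeric character.
import Mathlib
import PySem

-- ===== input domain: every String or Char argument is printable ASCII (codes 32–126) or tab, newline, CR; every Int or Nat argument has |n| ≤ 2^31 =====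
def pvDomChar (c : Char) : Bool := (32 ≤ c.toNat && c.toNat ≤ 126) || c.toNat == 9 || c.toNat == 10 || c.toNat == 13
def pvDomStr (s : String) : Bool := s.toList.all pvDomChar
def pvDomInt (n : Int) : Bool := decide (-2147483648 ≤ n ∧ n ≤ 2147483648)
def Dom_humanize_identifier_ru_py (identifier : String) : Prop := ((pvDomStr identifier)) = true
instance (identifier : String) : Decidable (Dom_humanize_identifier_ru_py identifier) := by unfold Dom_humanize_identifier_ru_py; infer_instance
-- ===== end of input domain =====

-- B fuses A's two passes (build a normalized string, then split it) into one pass that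
-- tokenizes the raw string directly; objective: simpler/alternative single-pass decomposition.

-- shared token table (the dict literal both Pythons carry)
def pvTokenLabels : PySem.Dict String String := PySem.Dict.mk [
  ("request", "заявка"), ("requests", "заявки"), ("invoice", "счет"), ("invoices", "счета"),
  ("topic", "тема"), ("topics", "темы"), ("status", "статус"), ("statuses", "статусы"),
  ("transition", "переход"), ("transitions", "переходы"), ("required", "обязательные"),
  ("form", "формы"), ("field", "поле"), ("fields", "поля"), ("template", "шаблон"),
  ("templates", "шаблоны"), ("data", "данных"), ("requirement", "требование"),
  ("requirements", "требования"), ("admin", "админ"), ("user", "пользователь"),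
  ("users", "пользователи"), ("quote", "цитата"), ("quotes", "цитаты"),
  ("message", "сообщение"), ("messages", "сообщения"), ("attachment", "вложение"),
  ("attachments", "вложения"), ("notification", "уведомление"),
  ("notifications", "уведомления"), ("audit", "аудита"), ("security", "безопасности"),
  ("log", "журнал"), ("history", "история"), ("otp", "OTP"), ("session", "сессия"),
  ("sessions", "сессии"), ("id", "ID")]

-- Python str.upper() on one char: PySem.Chars.upperChar is ASCII-only, but here the first
-- char of the phrase may be a Cyrillic label letter; hand-ported, exact on ASCII and on
-- Cyrillic а–я/ё (the only non-ASCII chars reachable: first letters of the table's values).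
def pvCharUpper (c : Char) : Char :=
  if (97 ≤ c.toNat && c.toNat ≤ 122) || (1072 ≤ c.toNat && c.toNat ≤ 1103) then
    Char.ofNat (c.toNat - 32)
  else if c.toNat == 1105 then Char.ofNat 1025 else c

-- phrase[:1].upper() + phrase[1:]  (the [:1] slice is the head; exact)
def pvCapFirst (phrase : List Char) : List Char :=
  match phrase with
  | [] => []
  | c :: r => pvCharUpper c :: r

-- ===== PORT A =====
-- loop body of _normalize_table_name's `for index, ch in enumerate(raw)`
def pvNormStep (raw : List Char) (acc : List Char) (p : Int × Char) : List Char :=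
  let cond := PySem.Chars.isupper p.2 && decide ((0:Int) < p.1) &&
    (match PySem.List.pyGet? raw (p.1 - 1) with
     | some pc => PySem.Chars.isalnum pc && decide (pc ≠ '_')
     | none => false)
  (if cond then acc ++ ['_'] else acc) ++ [PySem.Chars.lowerChar p.2]

def pvNormalizeTableName (table_name : String) : List Char :=
  let raw := PySem.Chars.replace (PySem.Chars.strip table_name.toList) ['-'] ['_']
  if raw = [] then [] else (PySem.List.enumerate raw).foldl (pvNormStep raw) []

def humanize_identifier_ru_py (identifier : String) : String :=
  let normalized := pvNormalizeTableName identifier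
  if normalized = [] then "Таблица" else
  let words := ((PySem.Chars.splitOn normalized ['_']).filter (fun t => !t.isEmpty)).map
      (fun t => (pvTokenLabels.getD (String.ofList t) (String.ofList t)).toList)
  if words = [] then "Таблица" else
  let phrase := PySem.Chars.strip (PySem.Chars.join [' '] words)
  if phrase = [] then "Таблица" else String.ofList (pvCapFirst phrase)

-- ===== PORT B =====
def pvFlush (toks : List (List Char)) (cur : List Char) : List (List Char) :=
  if cur.isEmpty then toks else toks ++ [cur]

-- loop body of Source B's single pass; state (prev, cur, tokens)
def pvTokStep (st : List Char × List Char × List (List Char)) (ch : Char) :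
    List Char × List Char × List (List Char) :=
  let prev := st.1; let cur := st.2.1; let toks := st.2.2
  if ch = '_' then ([ch], [], pvFlush toks cur)
  else if PySem.Chars.isupper ch && PySem.Chars.strIsalnum prev then
    ([ch], [PySem.Chars.lowerChar ch], pvFlush toks cur)
  else ([ch], cur ++ [PySem.Chars.lowerChar ch], toks)

def humanize_identifier_ru_py_alt (identifier : String) : String :=
  let raw := PySem.Chars.replace (PySem.Chars.strip identifier.toList) ['-'] ['_']
  let st := raw.foldl pvTokStep ([], [], [])
  let tokens := pvFlush st.2.2 st.2.1
  if tokens = [] then "Таблица" else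
  let phrase := PySem.Chars.strip (PySem.Chars.join [' ']
      (tokens.map (fun t => (pvTokenLabels.getD (String.ofList t) (String.ofList t)).toList)))
  if phrase = [] then "Таблица" else String.ofList (pvCapFirst phrase)

-- ===== PRECONDITION & SPEC =====
def Spec_humanize_identifier_ru_py (identifier : String) (out : String) : Prop := out = humanize_identifier_ru_py_alt identifier
instance (identifier : String) (out : String) : Decidable (Spec_humanize_identifier_ru_py identifier out) := by unfold Spec_humanize_identifier_ru_py; infer_instance

-- ===== CLAIM (what is proved, stated in full; the proofs are below) =====
def Claim_equal_humanize_identifier_ru_py : Prop := ∀ (identifier : String), Dom_humanize_identifier_ru_py identifier → Spec_humanize_identifier_ru_py identifier (humanize_identifier_ru_py identifier)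

-- ===== LEMMAS AND PROOFS =====

-- A's normalization as a prev-aware recursion (the Bool is "previous char is alnum and not '_'")
def pvNormRec (b : Bool) : List Char → List Char
  | [] => []
  | c :: r => (if PySem.Chars.isupper c && b then ['_'] else []) ++
              PySem.Chars.lowerChar c :: pvNormRec (PySem.Chars.isalnum c && decide (c ≠ '_')) r

-- split on '_' keeping empty pieces, with an accumulated current piece
def pvSplitU (pre : List Char) : List Char → List (List Char)
  | [] => [pre]
  | c :: r => if c = '_' then pre :: pvSplitU [] r else pvSplitU (pre ++ [c]) r

def pvPrevB (raw : List Char) (k : Nat) : Bool :=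
  match k with
  | 0 => false
  | k' + 1 => match raw[k']? with
    | some pc => PySem.Chars.isalnum pc && decide (pc ≠ '_')
    | none => false

lemma pvLowerChar_ne_underscore (c : Char) (h : c ≠ '_') : PySem.Chars.lowerChar c ≠ '_' := by
  unfold PySem.Chars.lowerChar
  split_ifs with hu
  · intro heq
    have hb : ('A' ≤ c) ∧ (c ≤ 'Z') := by
      simpa [PySem.Chars.isupper] using hu
    have h1 : (65:Nat) ≤ c.toNat := by
      have := hb.1; simp [Char.le_def, UInt32.le_iff_toNat_le] at this; exact this
    have h2 : c.toNat ≤ 90 := by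
      have := hb.2; simp [Char.le_def, UInt32.le_iff_toNat_le] at this; exact this
    have hv : (c.toNat + 32).isValidChar := Or.inl (by omega)
    have h3 := congrArg Char.toNat heq
    rw [Char.toNat_ofNat, if_pos hv] at h3
    have h4 : ('_':Char).toNat = 95 := by decide
    omega
  · exact h

lemma pvIsalnum_and_ne (c : Char) :
    (PySem.Chars.isalnum c && decide (c ≠ '_')) = PySem.Chars.isalnum c := by
  by_cases h : c = '_'
  · subst h; decide
  · simp [h]

lemma pvEnumFold (raw : List Char) : ∀ (suf : List Char) (k : Nat) (acc : List Char),
    raw.drop k = suf → k ≤ raw.length →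
    (PySem.List.enumerate suf (k : Int)).foldl (pvNormStep raw) acc
      = acc ++ pvNormRec (pvPrevB raw k) suf := by
  intro suf
  induction suf with
  | nil => intro k acc _ _; simp [PySem.List.enumerate, pvNormRec]
  | cons c rest ih =>
    intro k acc hdrop hk
    have hget : raw[k]? = some c := by
      have : (raw.drop k)[0]? = some c := by rw [hdrop]; rfl
      simpa using this
    have hk1 : k < raw.length := by
      rcases List.getElem?_eq_some_iff.mp hget with ⟨h, _⟩
      exact h
    have hdrop1 : raw.drop (k + 1) = rest := by
      have h := congrArg (List.drop 1) hdrop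
      simpa [List.drop_drop, Nat.add_comm] using h
    have hcast : (k : Int) + 1 = ((k + 1 : Nat) : Int) := by push_cast; ring
    have hcond : pvNormStep raw acc ((k : Int), c)
        = (if PySem.Chars.isupper c && pvPrevB raw k then acc ++ ['_'] else acc)
          ++ [PySem.Chars.lowerChar c] := by
      unfold pvNormStep
      cases k with
      | zero => simp [pvPrevB]
      | succ k' =>
        have : ((k' + 1 : Nat) : Int) - 1 = ((k' : Nat) : Int) := by push_cast; ring
        rw [this, PySem.List.pyGet?_natCast]
        simp [pvPrevB]
    have hnext : pvPrevB raw (k + 1) = (PySem.Chars.isalnum c && decide (c ≠ '_')) := by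
      simp [pvPrevB, hget]
    simp only [PySem.List.enumerate, List.foldl_cons]
    rw [hcond, hcast, ih (k + 1) _ hdrop1 (by omega), hnext]
    simp only [pvNormRec]
    split_ifs <;> simp

lemma pvGoEq : ∀ (fuel : Nat) (l cur : List Char) (acc : List (List Char)),
    l.length ≤ fuel →
    PySem.Chars.splitOn.go ['_'] fuel l cur acc = acc.reverse ++ pvSplitU cur.reverse l := by
  intro fuel
  induction fuel with
  | zero =>
    intro l cur acc h
    have hl : l = [] := List.length_eq_zero_iff.mp (Nat.le_zero.mp h)
    subst hl
    simp [PySem.Chars.splitOn.go, pvSplitU]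
  | succ n ih =>
    intro l cur acc h
    cases l with
    | nil => simp [PySem.Chars.splitOn.go, pvSplitU]
    | cons c rest =>
      by_cases hc : c = '_'
      · subst hc
        simp only [PySem.Chars.splitOn.go, List.isPrefixOf, beq_self_eq_true, Bool.true_and,
          if_true, List.length_cons, List.drop_succ_cons]
        rw [show List.drop ([] : List Char).length rest = rest from rfl,
          ih rest [] (cur.reverse :: acc) (by simpa using Nat.lt_succ_iff.mp (by simpa using h))]
        simp [pvSplitU]
      · simp only [PySem.Chars.splitOn.go, List.isPrefixOf]
        rw [if_neg (by simp [Ne.symm hc]), ih rest (c :: cur) acc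
          (by simpa using Nat.lt_succ_iff.mp (by simpa using h))]
        simp [pvSplitU, hc]

lemma pvSplitOn_eq (n : List Char) : PySem.Chars.splitOn n ['_'] = pvSplitU [] n := by
  unfold PySem.Chars.splitOn
  rw [pvGoEq (n.length + 1) n [] [] (Nat.le_succ _)]
  simp

lemma pvTokFold : ∀ (suf prev cur : List Char) (toks : List (List Char)),
    pvFlush (suf.foldl pvTokStep (prev, cur, toks)).2.2 (suf.foldl pvTokStep (prev, cur, toks)).2.1
      = toks ++ (pvSplitU cur (pvNormRec (PySem.Chars.strIsalnum prev) suf)).filter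
          (fun t => !t.isEmpty) := by
  intro suf
  induction suf with
  | nil =>
    intro prev cur toks
    cases cur <;> simp [pvFlush, pvSplitU, pvNormRec]
  | cons ch rest ih =>
    intro prev cur toks
    have hsingle : PySem.Chars.strIsalnum [ch] = PySem.Chars.isalnum ch := by
      simp [PySem.Chars.strIsalnum]
    by_cases h1 : ch = '_'
    · subst h1
      have hstep : pvTokStep (prev, cur, toks) '_' = (['_'], [], pvFlush toks cur) := by
        show (if '_' = '_' then (['_'], [], pvFlush toks cur)
          else if PySem.Chars.isupper '_' && PySem.Chars.strIsalnum prev then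
            (['_'], [PySem.Chars.lowerChar '_'], pvFlush toks cur)
          else (['_'], cur ++ [PySem.Chars.lowerChar '_'], toks)) = _
        rw [if_pos rfl]
      simp only [List.foldl_cons, hstep]
      rw [ih]
      have e1 : PySem.Chars.strIsalnum ['_'] = false := by decide
      have e2 : PySem.Chars.isupper '_' = false := by decide
      have e3 : PySem.Chars.lowerChar '_' = '_' := by decide
      have e4 : (PySem.Chars.isalnum '_' && decide (('_':Char) ≠ '_')) = false := by decide
      simp only [e1, e2, e3, e4, pvNormRec, Bool.false_and]
      cases cur <;> simp [pvFlush, pvSplitU]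
    · have hlc := pvLowerChar_ne_underscore ch h1
      by_cases h2 : (PySem.Chars.isupper ch && PySem.Chars.strIsalnum prev) = true
      · have hstep : pvTokStep (prev, cur, toks) ch
            = ([ch], [PySem.Chars.lowerChar ch], pvFlush toks cur) := by
          show (if ch = '_' then ([ch], [], pvFlush toks cur)
            else if PySem.Chars.isupper ch && PySem.Chars.strIsalnum prev then
              ([ch], [PySem.Chars.lowerChar ch], pvFlush toks cur)
            else ([ch], cur ++ [PySem.Chars.lowerChar ch], toks)) = _
          rw [if_neg h1, if_pos h2]
        simp only [List.foldl_cons, hstep]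
        rw [ih, hsingle]
        simp only [pvNormRec, pvIsalnum_and_ne, if_pos h2]
        simp only [List.cons_append, List.nil_append, pvSplitU, if_neg hlc]
        cases cur <;> simp [pvFlush]
      · have hstep : pvTokStep (prev, cur, toks) ch
            = ([ch], cur ++ [PySem.Chars.lowerChar ch], toks) := by
          show (if ch = '_' then ([ch], [], pvFlush toks cur)
            else if PySem.Chars.isupper ch && PySem.Chars.strIsalnum prev then
              ([ch], [PySem.Chars.lowerChar ch], pvFlush toks cur)
            else ([ch], cur ++ [PySem.Chars.lowerChar ch], toks)) = _
          rw [if_neg h1, if_neg h2]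
        simp only [List.foldl_cons, hstep]
        rw [ih, hsingle]
        simp only [pvNormRec, pvIsalnum_and_ne, if_neg h2]
        simp only [List.nil_append, pvSplitU, if_neg hlc]

lemma pvNormRec_ne_nil (b : Bool) (c : Char) (r : List Char) : pvNormRec b (c :: r) ≠ [] := by
  simp [pvNormRec]

lemma pvMain (id : String) : humanize_identifier_ru_py id = humanize_identifier_ru_py_alt id := by
  unfold humanize_identifier_ru_py humanize_identifier_ru_py_alt pvNormalizeTableName
  cases hr : PySem.Chars.replace (PySem.Chars.strip id.toList) ['-'] ['_'] with
  | nil => simp [pvFlush]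
  | cons c r =>
    have hA : (PySem.List.enumerate (c :: r) ((0 : Nat) : Int)).foldl (pvNormStep (c :: r)) []
        = pvNormRec false (c :: r) := by
      simpa [pvPrevB] using pvEnumFold (c :: r) (c :: r) 0 [] rfl (by simp)
    have hB := pvTokFold (c :: r) [] [] []
    have hempty : PySem.Chars.strIsalnum [] = false := by decide
    rw [hempty] at hB
    simp only [reduceCtorEq, ite_false]
    rw [show ((0:Int) = ((0:Nat):Int)) from rfl, hA, pvSplitOn_eq, hB]
    rw [if_neg (pvNormRec_ne_nil false c r)]
    simp only [List.nil_append]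
    by_cases hT : (pvSplitU [] (pvNormRec false (c :: r))).filter (fun t => !t.isEmpty) = []
    · simp [hT]
    · simp [hT, List.map_eq_nil_iff]

-- ===== VERDICT (by name: the statement is the Claim_ definition above) =====
theorem humanize_identifier_ru_py_spec : Claim_equal_humanize_identifier_ru_py := by
  intro identifier _
  unfold Spec_humanize_identifier_ru_py
  exact pvMain identifier
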